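-- pv_equiv track=rewrite | github.com/naturallyunintelligent/AdventOfCode_2024_python | day2/day2_b.py | strictly_decreasing
-- ===== SOURCE A (Python) =====
-- def list_dampner(i, L):
--     return L[:i+1] + L[i+2:]
--
-- def strictly_decreasing(dampener, L):
--     safe_list = []
--     for i, (x, y) in enumerate(zip(L, L[1:])):
--         if x == y:
--             dampener += 1
--             if dampener > 1:
--                 return False, L
--             dampened_list = list_dampner(i, L)
--             return strictly_decreasing(dampener, dampened_list)
--         if x > y and (x - y) <= 3:
--             safe_list.append(True)
--         if x > y and (x - y) > 3:
--             dampener += 1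
--             if dampener > 1:
--                 return False, L
--             dampened_list = list_dampner(i, L)
--             return strictly_decreasing(dampener, dampened_list)
--         if x < y:
--             dampener += 1
--             if dampener > 1:
--                 return False, L
--             dampened_list = list_dampner(i, L)
--             return strictly_decreasing(dampener, dampened_list)
--     if dampener > 1:
--         return False, L
--     return True, L
-- ===== SOURCE B (Python) =====
-- def strictly_decreasing(dampener, L):
--     while True:
--         bad = next((i for i, (x, y) in enumerate(zip(L, L[1:]))
--                     if not (x > y and x - y <= 3)), None)
--         if bad is None:
--             return (not dampener > 1), L
--         dampener += 1
--         if dampener > 1: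
--             return False, L
--         L = L[:bad + 1] + L[bad + 2:]
-- ===== Notes on version B (the rewrite author's own statement) =====
-- stated objective: simpler
-- what changed: Replaces A's recursion with three separate identical violation branches (and a dead safe_list accumulator) by a single iterative while-loop that finds the first pair violating 'strictly decreasing with gap <= 3' and drops the second element in place.
import Mathlib
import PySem

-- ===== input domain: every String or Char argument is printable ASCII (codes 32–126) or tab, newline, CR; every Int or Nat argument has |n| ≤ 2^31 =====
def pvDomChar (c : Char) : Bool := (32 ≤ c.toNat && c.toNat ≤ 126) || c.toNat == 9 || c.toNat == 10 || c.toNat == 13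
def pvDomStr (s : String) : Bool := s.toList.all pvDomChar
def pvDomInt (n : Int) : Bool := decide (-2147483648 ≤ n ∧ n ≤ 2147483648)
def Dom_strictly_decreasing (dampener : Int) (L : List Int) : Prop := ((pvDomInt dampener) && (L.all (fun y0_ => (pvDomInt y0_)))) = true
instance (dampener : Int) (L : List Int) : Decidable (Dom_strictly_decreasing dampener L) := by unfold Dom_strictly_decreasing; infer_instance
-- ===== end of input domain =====

-- B rewrites A's tail recursion (with three identical violation branches and a dead
-- safe_list) as one iterative while-loop: find the first violating pair, drop its
-- second element, repeat. Objective: simpler. Equivalence of return values is proved.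

-- ===== PORT A =====
-- L[:i+1] + L[i+2:]
def list_dampner (i : Int) (L : List Int) : List Int :=
  PySem.List.slice L none (some (i + 1)) ++ PySem.List.slice L (some (i + 2)) none

mutual
-- the body of strictly_decreasing; fuel only makes the recursion total (never exhausted
-- when started with L.length + 1, since each recursive call shortens L by one)
def sdGoA (fuel : Nat) (dampener : Int) (L : List Int) : Bool × List Int :=
  match fuel with
  | 0 => (true, L)
  | f + 1 =>
    sdLoopA f dampener L
      (PySem.List.enumerate (L.zip (PySem.List.slice L (some 1) none)) 0) []
termination_by (fuel, 0, 0)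

-- the 'for i, (x, y) in enumerate(zip(L, L[1:]))' loop, branches in source order;
-- safe is the (dead) safe_list accumulator
def sdLoopA (fuel : Nat) (dampener : Int) (L : List Int)
    (pairs : List (Int × (Int × Int))) (safe : List Bool) : Bool × List Int :=
  match pairs with
  | [] => if dampener > 1 then (false, L) else (true, L)
  | (i, (x, y)) :: rest =>
    if x = y then
      (if dampener + 1 > 1 then (false, L)
       else sdGoA fuel (dampener + 1) (list_dampner i L))
    else
      let safe := if x > y ∧ x - y ≤ 3 then safe ++ [true] else safe
      if x > y ∧ x - y > 3 then
        (if dampener + 1 > 1 then (false, L)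
         else sdGoA fuel (dampener + 1) (list_dampner i L))
      else if x < y then
        (if dampener + 1 > 1 then (false, L)
         else sdGoA fuel (dampener + 1) (list_dampner i L))
      else sdLoopA fuel dampener L rest safe
termination_by (fuel, 1, pairs.length)
end

def strictly_decreasing (dampener : Int) (L : List Int) : Bool × List Int :=
  sdGoA (L.length + 1) dampener L

-- ===== PORT B =====
-- the 'while True:' loop of Source B; same fuel guard for totality
def sdGoB (fuel : Nat) (dampener : Int) (L : List Int) : Bool × List Int :=
  match fuel with
  | 0 => (true, L)
  | f + 1 =>
    match (L.zip L.tail).findIdx? (fun p => !(decide (p.1 > p.2) && decide (p.1 - p.2 ≤ 3))) with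
    | none => (!decide (dampener > 1), L)
    | some bad =>
      if dampener + 1 > 1 then (false, L)
      else sdGoB f (dampener + 1) (L.take (bad + 1) ++ L.drop (bad + 2))

def strictly_decreasing_alt (dampener : Int) (L : List Int) : Bool × List Int :=
  sdGoB (L.length + 1) dampener L

-- ===== PRECONDITION & SPEC =====
def Spec_strictly_decreasing (dampener : Int) (L : List Int) (out : Bool × List Int) : Prop := out = strictly_decreasing_alt dampener L
instance (dampener : Int) (L : List Int) (out : Bool × List Int) : Decidable (Spec_strictly_decreasing dampener L out) := by unfold Spec_strictly_decreasing; infer_instance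

-- ===== CLAIM (what is proved, stated in full; the proofs are below) =====
def Claim_equal_strictly_decreasing : Prop := ∀ (dampener : Int) (L : List Int), Dom_strictly_decreasing dampener L → Spec_strictly_decreasing dampener L (strictly_decreasing dampener L)

-- ===== LEMMAS AND PROOFS =====

-- A's loop over 'enumerate' pairs, reduced to B's first-violation search
lemma sdLoopA_eq_findIdx (f : Nat) (d : Int) (L : List Int)
    (pairs : List (Int × Int)) (k : Nat) (safe : List Bool) :
    sdLoopA f d L (PySem.List.enumerate pairs (k : Int)) safe =
      match pairs.findIdx? (fun p => !(decide (p.1 > p.2) && decide (p.1 - p.2 ≤ 3))) with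
      | none => if d > 1 then (false, L) else (true, L)
      | some j =>
          if d + 1 > 1 then (false, L)
          else sdGoA f (d + 1) (list_dampner ((k + j : Nat) : Int) L) := by
  induction pairs generalizing k safe with
  | nil => simp [PySem.List.enumerate_nil, sdLoopA]
  | cons p rest ih =>
    obtain ⟨x, y⟩ := p
    rw [PySem.List.enumerate_cons, List.findIdx?_cons]
    by_cases hxy : x = y
    · simp [sdLoopA, hxy]
    · by_cases hgood : x > y ∧ x - y ≤ 3
      · -- not a violation: loop continues
        have hpred : (!(decide (x > y) && decide (x - y ≤ 3))) = false := by
          simp [hgood.1, hgood.2]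
        rw [show ((k : Int) + 1) = ((k + 1 : Nat) : Int) by push_cast; ring]
        rw [sdLoopA]
        simp only [hxy, if_false, hpred]
        have h3 : ¬(x > y ∧ x - y > 3) := by omega
        have hlt : ¬(x < y) := by omega
        simp only [h3, hlt, if_false]
        rw [ih (k + 1)]
        cases hj : rest.findIdx? (fun p => !(decide (p.1 > p.2) && decide (p.1 - p.2 ≤ 3))) with
        | none => simp
        | some j =>
          simp only [Option.map_some, Bool.false_eq_true, if_false]
          rw [show k + 1 + j = k + (j + 1) from by omega]
      · -- a violation: one of the three branches fires
        have hpred : (!(decide (x > y) && decide (x - y ≤ 3))) = true := by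
          rcases lt_trichotomy x y with h | h | h
          · simp [not_lt.mpr (le_of_lt h)]
          · exact absurd h hxy
          · have : ¬(x - y ≤ 3) := fun hle => hgood ⟨h, hle⟩
            simp [this]
        rw [sdLoopA]
        simp only [hxy, if_false, hpred]
        rcases lt_trichotomy x y with h | h | h
        · have h3 : ¬(x > y ∧ x - y > 3) := by omega
          simp [h3, h]
        · exact absurd h hxy
        · have h3 : x > y ∧ x - y > 3 := ⟨h, by omega⟩
          simp [h3]

-- one step of A equals one step of B, given the two bodies agree at smaller fuel
lemma sdGoA_eq_sdGoB (f : Nat) : ∀ (d : Int) (L : List Int), sdGoA f d L = sdGoB f d L := by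
  induction f with
  | zero => intro d L; simp [sdGoA, sdGoB]
  | succ f ih =>
    intro d L
    rw [sdGoA, sdGoB]
    rw [PySem.List.slice_from_one]
    have h0 := sdLoopA_eq_findIdx f d L (L.zip L.tail) 0 []
    simp only [Nat.cast_zero] at h0
    rw [h0]
    cases hj : (L.zip L.tail).findIdx? (fun p => !(decide (p.1 > p.2) && decide (p.1 - p.2 ≤ 3))) with
    | none =>
      by_cases hd : d > 1 <;> simp [hd]
    | some j =>
      simp only [Nat.zero_add]
      by_cases hd : d + 1 > 1
      · simp [hd]
      · simp only [hd, if_false]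
        rw [ih]
        congr 1
        -- list_dampner ↑j L = L.take (j+1) ++ L.drop (j+2)
        unfold list_dampner
        rw [show ((j : Int) + 1) = ((j + 1 : Nat) : Int) by push_cast; ring,
            show ((j : Int) + 2) = ((j + 2 : Nat) : Int) by push_cast; ring,
            PySem.List.slice_to_natCast, PySem.List.slice_from_natCast]

-- ===== VERDICT (by name: the statement is the Claim_ definition above) =====
theorem strictly_decreasing_spec : Claim_equal_strictly_decreasing := by
  intro d L _
  unfold Spec_strictly_decreasing strictly_decreasing strictly_decreasing_alt
  exact sdGoA_eq_sdGoB _ d L
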